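-- pv_equiv track=rewrite | github.com/AP-MI-2021/lab-4-popraulmarius | main.py | elimina_nr_prime
-- ===== SOURCE A (Python) =====
-- def prim(x):
--     #determina daca un numar este prim
--     if x<2:
--         return 0
--     if x==2:
--         return 1
--     for i in range (2,int(x/2)+1):
--         if x%i==0:
--             return 0
--     return 1
--
-- def elimina_nr_prime(lst):
--     #elimina numerele prime din lista
--     numere_prime_din_lst=[]
--     for i in lst:
--         if prim(i):
--             numere_prime_din_lst.append(i)
--     for i in numere_prime_din_lst:
--         lst.remove(i)
--     return lst
-- ===== SOURCE B (Python) =====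
-- def is_prime(x):
--     # sqrt-bounded trial division
--     if x < 2:
--         return False
--     i = 2
--     while i * i <= x:
--         if x % i == 0:
--             return False
--         i += 1
--     return True
--
-- def elimina_nr_prime(lst):
--     # single pass: keep non-primes; mutate lst in place like A does
--     lst[:] = [v for v in lst if not is_prime(v)]
--     return lst
-- ===== Notes on version B (the rewrite author's own statement) =====
-- stated objective: faster
-- what changed: Replaces A's collect-primes-then-list.remove-each two-phase O(n^2 + n*x) algorithm with a single-pass filter using a sqrt-bounded trial-division primality test (A trial-divides up to x/2).
import Mathlib
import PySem

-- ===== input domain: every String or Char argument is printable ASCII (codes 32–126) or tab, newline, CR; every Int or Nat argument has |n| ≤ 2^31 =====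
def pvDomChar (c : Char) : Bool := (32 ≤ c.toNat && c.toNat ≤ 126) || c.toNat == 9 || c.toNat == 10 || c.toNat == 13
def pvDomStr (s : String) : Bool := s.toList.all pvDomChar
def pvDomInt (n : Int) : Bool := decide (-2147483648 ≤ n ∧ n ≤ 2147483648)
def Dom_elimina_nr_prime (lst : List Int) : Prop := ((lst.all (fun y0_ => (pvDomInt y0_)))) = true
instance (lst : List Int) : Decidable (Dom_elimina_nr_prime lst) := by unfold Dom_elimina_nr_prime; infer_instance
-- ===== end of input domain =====

-- B replaces A's collect-then-remove two-phase algorithm by a single-pass filter with a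
-- sqrt-bounded primality test (A trial-divides up to x/2); faster in a timing run.
-- A mutates lst in place (list.remove); B performs the same in-place update (lst[:] = ...);
-- the equivalence proved here is about the return value.

-- ===== PORT A =====
-- for i in range(2, int(x/2)+1): if x%i==0: return 0 / after loop: return 1
def primLoop (x : Int) : List Int → Int
  | [] => 1
  | i :: rest => if x % i == 0 then 0 else primLoop x rest

def prim (x : Int) : Int :=
  if x < 2 then 0
  else if x == 2 then 1
  else primLoop x (PySem.List.pyRange 2 (x / 2 + 1) 1)

def elimina_nr_prime (lst : List Int) : List Int :=
  -- first loop: numere_prime_din_lst = primes of lst, in order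
  let numere_prime_din_lst :=
    lst.foldl (fun acc i => if prim i ≠ 0 then acc ++ [i] else acc) []
  -- second loop: lst.remove(i) for each collected prime (each is present, so remove? never fails)
  numere_prime_din_lst.foldl (fun l i => (PySem.List.remove? l i).getD l) lst

-- ===== PORT B =====
-- while i*i <= x: if x % i == 0: return False; i += 1
-- (the while loop is ported as structural recursion on a fuel counter; fuel x.toNat
--  is enough, since the loop stops once i exceeds sqrt x)
def trialLoop (x : Int) (fuel : Nat) (i : Int) : Bool :=
  match fuel with
  | 0 => true
  | fuel + 1 =>
    if i * i ≤ x then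
      if x % i == 0 then false else trialLoop x fuel (i + 1)
    else true

def is_prime (x : Int) : Bool :=
  if x < 2 then false else trialLoop x x.toNat 2

def elimina_nr_prime_alt (lst : List Int) : List Int :=
  lst.filter (fun v => !(is_prime v))

-- ===== PRECONDITION & SPEC =====
def Spec_elimina_nr_prime (lst : List Int) (out : List Int) : Prop := out = elimina_nr_prime_alt lst
instance (lst : List Int) (out : List Int) : Decidable (Spec_elimina_nr_prime lst out) := by unfold Spec_elimina_nr_prime; infer_instance

-- ===== CLAIM (what is proved, stated in full; the proofs are below) =====
def Claim_equal_elimina_nr_prime : Prop := ∀ (lst : List Int), Dom_elimina_nr_prime lst → Spec_elimina_nr_prime lst (elimina_nr_prime lst)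

-- ===== LEMMAS AND PROOFS =====

-- A's inner loop returns 1 iff no element of the list divides x
theorem primLoop_eq_one_iff (x : Int) (r : List Int) :
    primLoop x r = 1 ↔ ∀ i ∈ r, ¬ (x % i = 0) := by
  induction r with
  | nil => simp [primLoop]
  | cons a t ih =>
    by_cases h : x % a = 0
    · simp only [primLoop, beq_iff_eq, h, if_true, List.mem_cons]
      constructor
      · intro h01; exact absurd h01 (by norm_num)
      · intro hall; exact absurd h (hall a (Or.inl rfl))
    · simp only [primLoop, beq_iff_eq, h, if_false, List.mem_cons, ih]
      constructor
      · rintro hall i (rfl | hi)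
        · exact h
        · exact hall i hi
      · intro hall i hi; exact hall i (Or.inr hi)

-- A's inner loop only ever returns 0 or 1
theorem primLoop_zero_or_one (x : Int) (r : List Int) :
    primLoop x r = 0 ∨ primLoop x r = 1 := by
  induction r with
  | nil => right; rfl
  | cons a t ih =>
    by_cases h : x % a = 0
    · left; simp [primLoop, h]
    · simpa [primLoop, h] using ih

-- B's loop returns true iff no j with i ≤ j and j*j ≤ x divides x (given enough fuel)
theorem trialLoop_eq_true_iff (x : Int) (fuel : Nat) : ∀ i : Int, 1 ≤ i → x + 1 - i ≤ (fuel : Int) →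
    (trialLoop x fuel i = true ↔ ∀ j, i ≤ j → j * j ≤ x → ¬ (x % j = 0)) := by
  induction fuel with
  | zero =>
    intro i hi hf
    simp only [trialLoop, true_iff]
    intro j hj hjj _
    have hjj' : j ≤ j * j := le_mul_of_one_le_left (by omega) (by omega)
    norm_num at hf
    omega
  | succ fuel ih =>
    intro i hi hf
    by_cases h : i * i ≤ x
    · by_cases hd : x % i = 0
      · have hb : (x % i == 0) = true := by simp [hd]
        simp only [trialLoop, if_pos h, hb, if_true]
        constructor
        · intro hc; exact absurd hc (by norm_num)
        · intro hall; exact absurd hd (hall i le_rfl h)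
      · have hb : (x % i == 0) = false := by simp [hd]
        simp only [trialLoop, if_pos h, hb, Bool.false_eq_true, if_false]
        rw [ih (i + 1) (by omega) (by push_cast at hf ⊢; omega)]
        constructor
        · intro hall j hj hjj
          rcases eq_or_lt_of_le hj with rfl | hj'
          · exact hd
          · exact hall j (by omega) hjj
        · intro hall j hj hjj; exact hall j (by omega) hjj
    · simp only [trialLoop, if_neg h, true_iff]
      intro j hj hjj _
      have hij : i * i ≤ j * j := mul_le_mul hj hj (by omega) (by omega)
      exact h (le_trans hij hjj)

-- the two divisor bounds agree for x ≥ 3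
theorem divisor_bound_equiv (x : Int) (hx : 3 ≤ x) :
    (∃ i, 2 ≤ i ∧ i < x / 2 + 1 ∧ x % i = 0) ↔ (∃ j, 2 ≤ j ∧ j * j ≤ x ∧ x % j = 0) := by
  constructor
  · rintro ⟨i, h2, hlt, hdvd⟩
    have hix : 2 * i ≤ x := by omega
    by_cases hii : i * i ≤ x
    · exact ⟨i, h2, hii, hdvd⟩
    · push_neg at hii
      obtain ⟨q, hq⟩ := Int.dvd_of_emod_eq_zero hdvd
      have hipos : (0:Int) < i := by omega
      have hq2 : 2 ≤ q := by nlinarith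
      have hqlt : q < i := by nlinarith
      have hqq : q * q ≤ x := by nlinarith
      refine ⟨q, hq2, hqq, Int.emod_eq_zero_of_dvd ⟨i, by rw [hq]; ring⟩⟩
  · rintro ⟨j, h2, hjj, hdvd⟩
    have : 2 * j ≤ x := by nlinarith
    exact ⟨j, h2, by omega, hdvd⟩

-- pointwise: A's prime test agrees with B's
theorem prim_eq_is_prime (x : Int) : (decide (prim x ≠ 0)) = is_prime x := by
  by_cases h1 : x < 2
  · simp [prim, is_prime, h1]
  · have h1' : ¬ x < 2 := h1
    by_cases h2 : x = 2
    · subst h2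
      decide
    · have hx3 : 3 ≤ x := by omega
      have hb2 : (x == 2) = false := by simp [h2]
      have hA : prim x = primLoop x (PySem.List.pyRange 2 (x / 2 + 1) 1) := by
        simp [prim, h1', hb2]
      have hB : is_prime x = trialLoop x x.toNat 2 := by simp [is_prime, h1']
      rw [hA, hB]
      by_cases hd : ∃ i, 2 ≤ i ∧ i < x / 2 + 1 ∧ x % i = 0
      · -- a divisor exists: both report composite
        have hP0 : primLoop x (PySem.List.pyRange 2 (x / 2 + 1) 1) = 0 := by
          rcases primLoop_zero_or_one x (PySem.List.pyRange 2 (x / 2 + 1) 1) with h | h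
          · exact h
          · obtain ⟨i, hi2, hilt, hid⟩ := hd
            exact absurd hid
              ((primLoop_eq_one_iff x _).mp h i
                (by rw [PySem.List.mem_pyRange_one]; omega))
        obtain ⟨j, hj2, hjj, hjd⟩ := (divisor_bound_equiv x hx3).mp hd
        have hT : trialLoop x x.toNat 2 = false := by
          cases hT : trialLoop x x.toNat 2 with
          | false => rfl
          | true =>
            exact absurd hjd
              ((trialLoop_eq_true_iff x x.toNat 2 (by norm_num) (by omega)).mp hT j hj2 hjj)
        rw [hP0, hT]
        norm_num
      · -- no divisor: both report prime
        have hP1 : primLoop x (PySem.List.pyRange 2 (x / 2 + 1) 1) = 1 := by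
          rw [primLoop_eq_one_iff]
          intro i hi hid
          rw [PySem.List.mem_pyRange_one] at hi
          exact hd ⟨i, hi.1, hi.2, hid⟩
        have hT : trialLoop x x.toNat 2 = true := by
          rw [trialLoop_eq_true_iff x x.toNat 2 (by norm_num) (by omega)]
          intro j hj hjj hjd
          exact hd ((divisor_bound_equiv x hx3).mpr ⟨j, hj, hjj, hjd⟩)
        rw [hP1, hT]
        norm_num

-- A's first loop builds the primes of lst, in order
theorem fold_append_prim (lst acc : List Int) :
    lst.foldl (fun acc i => if prim i ≠ 0 then acc ++ [i] else acc) acc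
      = acc ++ lst.filter (fun i => decide (prim i ≠ 0)) := by
  induction lst generalizing acc with
  | nil => simp
  | cons a t ih =>
    rw [List.foldl_cons, ih]
    by_cases h : prim a ≠ 0
    · rw [if_pos h]
      simp [List.filter_cons, h]
    · rw [if_neg h]
      simp [List.filter_cons, h]

-- removing, in order, the elements of a prime-only list distributes over a non-prime head
theorem fold_remove_cons (p : Int → Bool) (a : Int) (ha : p a = false) :
    ∀ (ps l : List Int), (∀ i ∈ ps, p i = true) →
      ps.foldl (fun l i => (PySem.List.remove? l i).getD l) (a :: l)
        = a :: ps.foldl (fun l i => (PySem.List.remove? l i).getD l) l := by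
  intro ps
  induction ps with
  | nil => intro l _; simp
  | cons b t ih =>
    intro l hall
    have hne : a ≠ b := by
      intro h
      have := hall b (List.mem_cons_self ..)
      rw [h, this] at ha; cases ha
    simp only [List.foldl]
    have hstep : (PySem.List.remove? (a :: l) b).getD (a :: l)
        = a :: (PySem.List.remove? l b).getD l := by
      rw [PySem.List.remove?_cons_of_ne l hne]
      cases PySem.List.remove? l b <;> rfl
    rw [hstep, ih _ (fun i hi => hall i (List.mem_cons_of_mem _ hi))]

-- the remove phase turns lst into the non-primes of lst
theorem fold_remove_filter (p : Int → Bool) (lst : List Int) :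
    (lst.filter p).foldl (fun l i => (PySem.List.remove? l i).getD l) lst
      = lst.filter (fun i => !(p i)) := by
  induction lst with
  | nil => simp
  | cons a t ih =>
    by_cases h : p a
    · simp only [List.filter, h, List.foldl]
      rw [PySem.List.remove?_cons_self, Option.getD_some]
      simpa [h] using ih
    · have h' : p a = false := by simpa using h
      simp only [List.filter, h']
      rw [fold_remove_cons p a h' _ t (fun i hi => (List.mem_filter.mp hi).2), ih]
      simp [h']

-- ===== VERDICT (by name: the statement is the Claim_ definition above) =====
theorem elimina_nr_prime_spec : Claim_equal_elimina_nr_prime := by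
  intro lst _
  unfold Spec_elimina_nr_prime elimina_nr_prime elimina_nr_prime_alt
  rw [fold_append_prim lst [], List.nil_append,
    fold_remove_filter (fun i => decide (prim i ≠ 0)) lst]
  apply List.filter_congr
  intro x _
  rw [prim_eq_is_prime]
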